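-- pv_equiv track=rewrite | github.com/Xnavier/battleshipbot | battleshipbot.py | analyze_clusters
-- ===== SOURCE A (Python) =====
-- def analyze_clusters(board):
--     height = len(board)
--     width = len(board[0])
--     visited = [[False] * width for _ in range(height)]
--     ship_clusters = []
--     ship_to_cluster = {}
--
--     # Directions for adjacency: 8 directions (including diagonals)
--     directions = [(-1, -1), (-1, 0), (-1, 1),
--                   (0, -1),          (0, 1),
--                   (1, -1),  (1, 0), (1, 1)]
--
--     def dfs(y, x, cluster_set):
--         visited[y][x] = True
--         ship_id = board[y][x]
--         cluster_set.add(ship_id)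
--         for dy, dx in directions:
--             ny, nx = y + dy, x + dx
--             if 0 <= ny < height and 0 <= nx < width and not visited[ny][nx]:
--                 neighbor = board[ny][nx]
--                 if neighbor > 0 and neighbor != ship_id:
--                     dfs(ny, nx, cluster_set)
--
--     # Loop through the board and explore clusters
--     for y in range(height):
--         for x in range(width):
--             if board[y][x] > 0 and not visited[y][x]:
--                 cluster_set = set()
--                 dfs(y, x, cluster_set)
--                 if cluster_set:
--                     cluster_frozen = frozenset(cluster_set)
--                     if cluster_frozen not in ship_clusters:
--                         ship_clusters.append(cluster_frozen)
--
--     return ship_clusters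
-- ===== SOURCE B (Python) =====
-- # Iterative re-implementation: the recursive dfs is replaced by an explicit LIFO
-- # stack of (row, col, next-direction-index) frames; cells are marked visited and
-- # their id added to the cluster when the frame is pushed, so no cell is expanded
-- # twice and the visitation order (hence everything observable) matches A's.
-- def analyze_clusters(board):
--     height = len(board)
--     width = len(board[0])
--     visited = [[False] * width for _ in range(height)]
--     ship_clusters = []
--
--     directions = [(-1, -1), (-1, 0), (-1, 1),
--                   (0, -1),          (0, 1),
--                   (1, -1),  (1, 0), (1, 1)]
--
--     for y in range(height):
--         for x in range(width):
--             if board[y][x] > 0 and not visited[y][x]: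
--                 visited[y][x] = True
--                 cluster = {board[y][x]}
--                 stack = [(y, x, 0)]
--                 while stack:
--                     cy, cx, i = stack.pop()
--                     if i < 8:
--                         stack.append((cy, cx, i + 1))
--                         dy, dx = directions[i]
--                         ny, nx = cy + dy, cx + dx
--                         if 0 <= ny < height and 0 <= nx < width and not visited[ny][nx]:
--                             v = board[ny][nx]
--                             if v > 0 and v != board[cy][cx]:
--                                 visited[ny][nx] = True
--                                 cluster.add(v)
--                                 stack.append((ny, nx, 0))
--                 fs = frozenset(cluster)
--                 if fs not in ship_clusters:
--                     ship_clusters.append(fs)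
--     return ship_clusters
-- ===== Notes on version B (the rewrite author's own statement) =====
-- stated objective: alternative
-- what changed: The recursive closure-based dfs (which mutates enclosing state and can hit Python's recursion limit) is replaced by an iterative flood fill driven by an explicit LIFO stack of (row, col, next-direction-index) frames with mark-on-push, in a flat loop with no nested function.
import Mathlib
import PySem

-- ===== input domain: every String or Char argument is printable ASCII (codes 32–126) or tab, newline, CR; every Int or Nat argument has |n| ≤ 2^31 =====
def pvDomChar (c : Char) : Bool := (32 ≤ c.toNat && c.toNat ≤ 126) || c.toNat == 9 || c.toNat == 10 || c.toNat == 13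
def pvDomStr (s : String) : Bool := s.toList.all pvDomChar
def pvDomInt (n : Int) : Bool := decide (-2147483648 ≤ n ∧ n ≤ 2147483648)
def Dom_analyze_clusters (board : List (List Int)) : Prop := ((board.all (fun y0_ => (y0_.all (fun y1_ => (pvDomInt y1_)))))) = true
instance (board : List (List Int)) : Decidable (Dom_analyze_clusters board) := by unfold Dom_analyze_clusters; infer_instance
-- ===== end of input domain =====

-- B replaces A's recursive closure dfs by an explicit LIFO stack of
-- (row, col, next-direction-index) frames with mark-on-push (objective:
-- alternative decomposition, same asymptotic cost, same return value).

-- ===== PORT A =====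
-- shared helpers (board/visited access, used by both ports)
def pvDirs : List (Int × Int) :=
  [(-1, -1), (-1, 0), (-1, 1), (0, -1), (0, 1), (1, -1), (1, 0), (1, 1)]

def pvBval (board : List (List Int)) (y x : Int) : Int :=
  (board.getD y.toNat []).getD x.toNat 0

def pvVis (v : List (List Bool)) (y x : Int) : Bool :=
  (v.getD y.toNat []).getD x.toNat true

def pvMark (v : List (List Bool)) (y x : Int) : List (List Bool) :=
  v.set y.toNat ((v.getD y.toNat []).set x.toNat true)

/-- number of not-yet-visited entries: the termination measure of the flood fill -/
def pvCF (v : List (List Bool)) : Nat := (v.map (fun r => r.count false)).sum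

-- termination lemma cited by both ports' `decreasing_by`
lemma pvCount_set_true {l : List Bool} : ∀ {m : Nat}, l.getD m true = false →
    ((l.set m true).count false + 1 = l.count false ∧ m < l.length) := by
  induction l with
  | nil => intro m hm; simp at hm
  | cons b t ih =>
    intro m hf
    cases m with
    | zero =>
      simp only [List.getD_cons_zero] at hf
      subst hf
      simp
    | succ k =>
      simp only [List.getD_cons_succ] at hf
      obtain ⟨h1, h2⟩ := ih hf
      refine ⟨?_, by simpa using Nat.succ_lt_succ h2⟩
      simp [List.count_cons]
      omega

lemma pvCF_set {v : List (List Bool)} : ∀ {n : Nat}, n < v.length → ∀ r' : List Bool,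
    pvCF (v.set n r') + (v.getD n []).count false = pvCF v + r'.count false := by
  induction v with
  | nil => intro n hn; simp at hn
  | cons r t ih =>
    intro n hn r'
    cases n with
    | zero => simp [pvCF]; omega
    | succ k =>
      simp only [List.length_cons, Nat.succ_lt_succ_iff] at hn
      have := ih hn r'
      simp only [pvCF, List.set_cons_succ, List.map_cons, List.sum_cons, List.getD_cons_succ] at *
      omega

lemma pvCF_mark_lt {v : List (List Bool)} {y x : Int} (hv : pvVis v y x = false) :
    pvCF (pvMark v y x) < pvCF v := by
  unfold pvVis at hv
  by_cases hn : y.toNat < v.length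
  · obtain ⟨h1, _⟩ := pvCount_set_true hv
    have h2 := pvCF_set hn ((v.getD y.toNat []).set x.toNat true)
    unfold pvMark
    omega
  · rw [List.getD_eq_default _ _ (Nat.le_of_not_lt hn)] at hv; simp at hv

-- literal port of A's recursive dfs; the subtype result carries the bound the
-- termination argument needs (the value component is exactly what Python computes)
mutual
def pyDfs (board : List (List Int)) (h w : Int) (s : List (List Bool) × List Int)
    (y x : Int) (hv : pvVis s.1 y x = false) :
    {t : List (List Bool) × List Int // pvCF t.1 < pvCF s.1} :=
  let s1 := (pvMark s.1 y x, PySem.Set.add s.2 (pvBval board y x))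
  let r := pyVisitDirs board h w s1 y x pvDirs
  ⟨r.1, lt_of_le_of_lt r.2 (pvCF_mark_lt hv)⟩
termination_by (pvCF s.1, 0)
decreasing_by exact Prod.Lex.left _ _ (pvCF_mark_lt hv)

def pyVisitDirs (board : List (List Int)) (h w : Int) (s : List (List Bool) × List Int)
    (y x : Int) (ds : List (Int × Int)) :
    {t : List (List Bool) × List Int // pvCF t.1 ≤ pvCF s.1} :=
  match ds with
  | [] => ⟨s, Nat.le_refl _⟩
  | (dy, dx) :: rest =>
    let ny := y + dy
    let nx := x + dx
    if hc : (0 ≤ ny ∧ ny < h ∧ 0 ≤ nx ∧ nx < w ∧ pvVis s.1 ny nx = false) ∧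
        0 < pvBval board ny nx ∧ pvBval board ny nx ≠ pvBval board y x then
      let u := pyDfs board h w s ny nx hc.1.2.2.2.2
      let r := pyVisitDirs board h w u.1 y x rest
      ⟨r.1, Nat.le_trans r.2 (Nat.le_of_lt u.2)⟩
    else pyVisitDirs board h w s y x rest
termination_by (pvCF s.1, ds.length + 1)
decreasing_by
  · exact Prod.Lex.right _ (by simp [List.length_cons])
  · exact Prod.Lex.left _ _ u.2
  · exact Prod.Lex.right _ (by simp [List.length_cons])
end

def analyze_clusters (board : List (List Int)) : List (List Int) :=
  let height : Int := board.length
  let width : Int := (board.getD 0 []).length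
  let visited : List (List Bool) :=
    List.replicate height.toNat (List.replicate width.toNat false)
  let res := (PySem.List.pyRange 0 height 1).foldl (fun acc y =>
      (PySem.List.pyRange 0 width 1).foldl (fun (acc : List (List Bool) × List (List Int)) x =>
        if hx : 0 < pvBval board y x ∧ pvVis acc.1 y x = false then
          let r := (pyDfs board height width (acc.1, ([] : List Int)) y x hx.2).1
          if r.2 ≠ [] then
            if acc.2.any (fun c => PySem.Set.equal c r.2) then (r.1, acc.2)
            else (r.1, acc.2 ++ [r.2])
          else (r.1, acc.2)
        else acc) acc)
    ((visited, ([] : List (List Int))))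
  res.2

-- ===== PORT B =====
def pvWeight (stack : List (Int × Int × Nat)) : Nat :=
  (stack.map (fun f => 10 - min f.2.2 9)).sum

-- the explicit frame stack of Source B: frame (cy, cx, i) = cell already marked,
-- next direction to try is i
def pyLoop (board : List (List Int)) (h w : Int) (stack : List (Int × Int × Nat))
    (s : List (List Bool) × List Int) : List (List Bool) × List Int :=
  match stack with
  | [] => s
  | (cy, cx, i) :: st =>
    if i < 8 then
      let d := pvDirs.getD i (0, 0)
      let ny := cy + d.1
      let nx := cx + d.2
      if hc : (0 ≤ ny ∧ ny < h ∧ 0 ≤ nx ∧ nx < w ∧ pvVis s.1 ny nx = false) ∧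
          0 < pvBval board ny nx ∧ pvBval board ny nx ≠ pvBval board cy cx then
        pyLoop board h w ((ny, nx, 0) :: (cy, cx, i + 1) :: st)
          (pvMark s.1 ny nx, PySem.Set.add s.2 (pvBval board ny nx))
      else
        pyLoop board h w ((cy, cx, i + 1) :: st) s
    else
      pyLoop board h w st s
termination_by (pvCF s.1, pvWeight stack)
decreasing_by
  · exact Prod.Lex.left _ _ (pvCF_mark_lt hc.1.2.2.2.2)
  · apply Prod.Lex.right; simp only [pvWeight, List.map_cons, List.sum_cons]; omega
  · apply Prod.Lex.right; simp only [pvWeight, List.map_cons, List.sum_cons]; omega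

def pyCollect (board : List (List Int)) (h w : Int) (vis : List (List Bool))
    (y x : Int) : List (List Bool) × List Int :=
  pyLoop board h w [(y, x, 0)]
    (pvMark vis y x, PySem.Set.ofList [pvBval board y x])

def analyze_clusters_alt (board : List (List Int)) : List (List Int) :=
  let height : Int := board.length
  let width : Int := (board.getD 0 []).length
  let visited : List (List Bool) :=
    List.replicate height.toNat (List.replicate width.toNat false)
  let res := (PySem.List.pyRange 0 height 1).foldl (fun acc y =>
      (PySem.List.pyRange 0 width 1).foldl (fun (acc : List (List Bool) × List (List Int)) x =>
        if 0 < pvBval board y x ∧ pvVis acc.1 y x = false then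
          let r := pyCollect board height width acc.1 y x
          if acc.2.any (fun c => PySem.Set.equal c r.2) then (r.1, acc.2)
          else (r.1, acc.2 ++ [r.2])
        else acc) acc)
    ((visited, ([] : List (List Int))))
  res.2

-- ===== PRECONDITION & SPEC =====
-- Pre_ excludes exactly the inputs on which A raises IndexError: an empty board
-- (board[0]) and boards where some row is shorter than the first row (the scan
-- indexes every row up to width = len(board[0])).
def Pre_analyze_clusters (board : List (List Int)) : Prop :=
  board ≠ [] ∧ ∀ row ∈ board, (board.headI).length ≤ row.length
instance (board : List (List Int)) : Decidable (Pre_analyze_clusters board) := by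
  unfold Pre_analyze_clusters; infer_instance

def pvWitness_analyze_clusters : List (List Int) := [[1, 2], [0, 3]]

def Spec_analyze_clusters (board : List (List Int)) (out : List (List Int)) : Prop := out = analyze_clusters_alt board
instance (board : List (List Int)) (out : List (List Int)) : Decidable (Spec_analyze_clusters board out) := by unfold Spec_analyze_clusters; infer_instance

-- ===== CLAIM (what is proved, stated in full; the proofs are below) =====
def Claim_equal_analyze_clusters : Prop := ∀ (board : List (List Int)), Dom_analyze_clusters board → Pre_analyze_clusters board → Spec_analyze_clusters board (analyze_clusters board)

-- ===== LEMMAS AND PROOFS =====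

-- simulation: running the frame (y, x, i) on top of the stack is the same as
-- resuming A's direction loop at direction i (the cell itself already marked)
theorem pvLoop_eq_visitDirs (board : List (List Int)) (h w : Int)
    (s : List (List Bool) × List Int) (y x : Int) (i : Nat) (st : List (Int × Int × Nat)) :
    pyLoop board h w ((y, x, i) :: st) s =
      pyLoop board h w st (pyVisitDirs board h w s y x (pvDirs.drop i)).1 := by
  by_cases hi : i < 8
  · have hlen : i < pvDirs.length := by simp [pvDirs]; omega
    rcases hdd : pvDirs[i] with ⟨dy, dx⟩
    have hdrop : pvDirs.drop i = (dy, dx) :: pvDirs.drop (i + 1) := by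
      rw [List.drop_eq_getElem_cons hlen, hdd]
    have hgetD : pvDirs.getD i (0, 0) = (dy, dx) := by
      rw [List.getD_eq_getElem _ _ hlen, hdd]
    rw [hdrop]
    rw [pyLoop]
    simp only [if_pos hi, hgetD]
    by_cases hc : (0 ≤ y + dy ∧ y + dy < h ∧ 0 ≤ x + dx ∧ x + dx < w ∧
        pvVis s.1 (y + dy) (x + dx) = false) ∧
        0 < pvBval board (y + dy) (x + dx) ∧
        pvBval board (y + dy) (x + dx) ≠ pvBval board y x
    · simp only [dif_pos hc]
      have h1 : pvCF (pvMark s.1 (y + dy) (x + dx)) < pvCF s.1 :=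
        pvCF_mark_lt hc.1.2.2.2.2
      rw [pvLoop_eq_visitDirs board h w _ (y + dy) (x + dx) 0 ((y, x, i + 1) :: st)]
      rw [List.drop_zero]
      have hd : (↑(pyDfs board h w s (y + dy) (x + dx) hc.1.2.2.2.2) :
          List (List Bool) × List Int) =
          ↑(pyVisitDirs board h w
            (pvMark s.1 (y + dy) (x + dx), PySem.Set.add s.2 (pvBval board (y + dy) (x + dx)))
            (y + dy) (x + dx) pvDirs) := by
        simp only [pyDfs]
      rw [← hd]
      have h2 : pvCF (pyDfs board h w s (y + dy) (x + dx) hc.1.2.2.2.2).1.1 < pvCF s.1 :=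
        (pyDfs board h w s (y + dy) (x + dx) hc.1.2.2.2.2).2
      rw [pvLoop_eq_visitDirs board h w _ y x (i + 1) st]
      rw [pyVisitDirs]
      rw [dif_pos hc]
    · simp only [dif_neg hc]
      rw [pvLoop_eq_visitDirs board h w s y x (i + 1) st]
      rw [pyVisitDirs]
      rw [dif_neg hc]
  · have hdrop : pvDirs.drop i = [] := by
      apply List.drop_eq_nil_of_le; simp [pvDirs]; omega
    rw [hdrop]
    rw [pyLoop]
    simp only [if_neg hi]
    rw [pyVisitDirs]
termination_by (pvCF s.1, 9 - i)

lemma pvSet_add_len {l : List Int} (a : Int) : l.length ≤ (PySem.Set.add l a).length := by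
  unfold PySem.Set.add
  split <;> simp

lemma pvLoop_snd_len (board : List (List Int)) (h w : Int)
    (stack : List (Int × Int × Nat)) (s : List (List Bool) × List Int) :
    s.2.length ≤ (pyLoop board h w stack s).2.length := by
  match stack with
  | [] => rw [pyLoop]
  | (cy, cx, i) :: st =>
    rw [pyLoop]
    by_cases hi : i < 8
    · simp only [if_pos hi]
      by_cases hc : (0 ≤ cy + (pvDirs.getD i (0, 0)).1 ∧ cy + (pvDirs.getD i (0, 0)).1 < h ∧
          0 ≤ cx + (pvDirs.getD i (0, 0)).2 ∧ cx + (pvDirs.getD i (0, 0)).2 < w ∧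
          pvVis s.1 (cy + (pvDirs.getD i (0, 0)).1) (cx + (pvDirs.getD i (0, 0)).2) = false) ∧
          0 < pvBval board (cy + (pvDirs.getD i (0, 0)).1) (cx + (pvDirs.getD i (0, 0)).2) ∧
          pvBval board (cy + (pvDirs.getD i (0, 0)).1) (cx + (pvDirs.getD i (0, 0)).2) ≠
            pvBval board cy cx
      · rw [dif_pos hc]
        exact Nat.le_trans (pvSet_add_len _)
          (pvLoop_snd_len board h w _ (pvMark s.1 _ _, PySem.Set.add s.2 _))
      · rw [dif_neg hc]
        exact pvLoop_snd_len board h w _ s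
    · simp only [if_neg hi]
      exact pvLoop_snd_len board h w st s
termination_by (pvCF s.1, pvWeight stack)
decreasing_by
  · exact Prod.Lex.left _ _ (pvCF_mark_lt hc.1.2.2.2.2)
  · apply Prod.Lex.right; simp only [pvWeight, List.map_cons, List.sum_cons]; omega
  · apply Prod.Lex.right; simp only [pvWeight, List.map_cons, List.sum_cons]; omega

lemma pvCollect_snd_ne (board : List (List Int)) (h w : Int) (vis : List (List Bool))
    (y x : Int) : (pyCollect board h w vis y x).2 ≠ [] := by
  have h1 : (PySem.Set.ofList [pvBval board y x] : List Int).length = 1 := rfl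
  have h2 := pvLoop_snd_len board h w [(y, x, 0)]
    (pvMark vis y x, PySem.Set.ofList [pvBval board y x])
  rw [h1] at h2
  unfold pyCollect
  exact List.ne_nil_of_length_pos (by omega)

lemma pvDfs_eq_collect (board : List (List Int)) (h w : Int) (vis : List (List Bool))
    (y x : Int) (hv : pvVis vis y x = false) :
    (pyDfs board h w (vis, ([] : List Int)) y x hv).1 = pyCollect board h w vis y x := by
  unfold pyCollect
  rw [pvLoop_eq_visitDirs board h w _ y x 0 []]
  rw [List.drop_zero, pyLoop]
  simp only [pyDfs]
  rfl

-- ===== VERDICT (by name: the statement is the Claim_ definition above) =====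
theorem analyze_clusters_spec : Claim_equal_analyze_clusters := by
  intro board _ _
  unfold Spec_analyze_clusters
  simp only [analyze_clusters, analyze_clusters_alt]
  refine congrArg Prod.snd ?_
  have hfun : ∀ (acc : List (List Bool) × List (List Int)) (y x : Int),
      (if hx : 0 < pvBval board y x ∧ pvVis acc.1 y x = false then
        let r := (pyDfs board (board.length : Int) ((board.getD 0 []).length : Int)
          (acc.1, ([] : List Int)) y x hx.2).1
        if r.2 ≠ [] then
          if acc.2.any (fun c => PySem.Set.equal c r.2) then (r.1, acc.2)
          else (r.1, acc.2 ++ [r.2])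
        else (r.1, acc.2)
      else acc) =
      (if 0 < pvBval board y x ∧ pvVis acc.1 y x = false then
        let r := pyCollect board (board.length : Int) ((board.getD 0 []).length : Int) acc.1 y x
        if acc.2.any (fun c => PySem.Set.equal c r.2) then (r.1, acc.2)
        else (r.1, acc.2 ++ [r.2])
      else acc) := by
    intro acc y x
    by_cases hx : 0 < pvBval board y x ∧ pvVis acc.1 y x = false
    · rw [dif_pos hx, if_pos hx]
      simp only [pvDfs_eq_collect board _ _ acc.1 y x hx.2]
      rw [if_pos (pvCollect_snd_ne board _ _ acc.1 y x)]
    · rw [dif_neg hx, if_neg hx]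
  simp only [hfun]
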